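-- pv_equiv track=rewrite | github.com/Sissy12138/WBI-Analysis-for-Salt-Chemotaxis | WBI_analysis/ImageProcessingBehaviorAnalysis/worm_analysis_utils_2.py | filter_subset
-- ===== SOURCE A (Python) =====
-- def filter_subset(arr, threshold=500):
--     '''
--     过滤数组中较小的元素，返回大于threshold的子集'''
--     arr_sorted = sorted(arr)
--     n = len(arr_sorted)
--     if n < 2:
--         return []
--     for i in range(n - 1):
--         if arr_sorted[i] + arr_sorted[i+1] > threshold:
--             if n - i >= 2:
--                 return arr_sorted[i:]
--             else:
--                 return []
--     return []
-- ===== SOURCE B (Python) =====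
-- def filter_subset(arr, threshold=500):
--     '''
--     过滤数组中较小的元素，返回大于threshold的子集'''
--     s = sorted(arr)
--     n = len(s)
--     if n < 2:
--         return []
--     if s[n - 2] + s[n - 1] <= threshold:
--         return []
--     lo, hi = 0, n - 2
--     while lo < hi:
--         mid = (lo + hi) // 2
--         if s[mid] + s[mid + 1] > threshold:
--             hi = mid
--         else:
--             lo = mid + 1
--     return s[lo:]
-- ===== Notes on version B (the rewrite author's own statement) =====
-- stated objective: alternative
-- what changed: After sorting, the pair-sum predicate is monotone in the index, so B replaces A's linear scan for the first qualifying adjacent pair with a binary search over [0, n-2] (with one guard on the last pair for the all-fail case); total cost is still dominated by the sort.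
import Mathlib
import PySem

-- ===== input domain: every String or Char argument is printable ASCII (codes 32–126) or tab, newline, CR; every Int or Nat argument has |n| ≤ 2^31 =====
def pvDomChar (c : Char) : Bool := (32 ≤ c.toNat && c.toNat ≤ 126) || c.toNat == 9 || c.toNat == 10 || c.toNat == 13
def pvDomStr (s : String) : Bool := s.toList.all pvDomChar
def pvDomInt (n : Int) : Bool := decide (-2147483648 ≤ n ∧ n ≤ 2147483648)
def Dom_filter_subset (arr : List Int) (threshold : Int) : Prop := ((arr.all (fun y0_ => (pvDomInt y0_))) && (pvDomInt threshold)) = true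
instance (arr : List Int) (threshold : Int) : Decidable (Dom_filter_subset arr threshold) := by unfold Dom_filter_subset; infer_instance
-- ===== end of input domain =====

-- B replaces A's linear scan for the first qualifying adjacent pair (the predicate is
-- monotone on the sorted list) by a binary search; same return value everywhere.

-- ===== PORT A =====
-- scan of `for i in range(n-1): ...`; every index i visited satisfies 0 ≤ i ≤ n-2,
-- so it is in range and pyGetD is exact for Python's s[i].
def filterALoop (s : List Int) (n t : Int) : List Int → List Int
  | [] => []
  | i :: rest =>
    if PySem.List.pyGetD s i 0 + PySem.List.pyGetD s (i + 1) 0 > t then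
      if n - i ≥ 2 then PySem.List.slice s (some i) none else []
    else filterALoop s n t rest

def filter_subset (arr : List Int) (threshold : Int) : List Int :=
  let arr_sorted := PySem.List.sorted arr (fun x => x) false
  let n : Int := arr_sorted.length
  if n < 2 then []
  else filterALoop arr_sorted n threshold (PySem.List.pyRange 0 (n - 1) 1)

-- ===== PORT B =====
-- binary search for the leftmost i in [lo, hi] with s[i]+s[i+1] > t; all indices used
-- lie in [0, n-1], so pyGetD is exact for Python's s[...].
def bsearchPair (s : List Int) (t : Int) (lo hi : Int) : List Int :=
  if h : lo < hi then
    let mid := PySem.Int.floordiv (lo + hi) 2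
    if PySem.List.pyGetD s mid 0 + PySem.List.pyGetD s (mid + 1) 0 > t then
      bsearchPair s t lo mid
    else
      bsearchPair s t (mid + 1) hi
  else PySem.List.slice s (some lo) none
termination_by (hi - lo).toNat
decreasing_by
  · have h2 : PySem.Int.floordiv (lo + hi) 2 = (lo + hi) / 2 :=
      PySem.Int.floordiv_eq_ediv_of_pos (by omega)
    simp only [h2]; omega
  · have h2 : PySem.Int.floordiv (lo + hi) 2 = (lo + hi) / 2 :=
      PySem.Int.floordiv_eq_ediv_of_pos (by omega)
    simp only [h2]; omega

def filter_subset_alt (arr : List Int) (threshold : Int) : List Int :=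
  let s := PySem.List.sorted arr (fun x => x) false
  let n : Int := s.length
  if n < 2 then []
  else if PySem.List.pyGetD s (n - 2) 0 + PySem.List.pyGetD s (n - 1) 0 ≤ threshold then []
  else bsearchPair s threshold 0 (n - 2)

-- ===== PRECONDITION & SPEC =====
def Spec_filter_subset (arr : List Int) (threshold : Int) (out : List Int) : Prop := out = filter_subset_alt arr threshold
instance (arr : List Int) (threshold : Int) (out : List Int) : Decidable (Spec_filter_subset arr threshold out) := by unfold Spec_filter_subset; infer_instance

-- ===== CLAIM (what is proved, stated in full; the proofs are below) =====
def Claim_equal_filter_subset : Prop := ∀ (arr : List Int) (threshold : Int), Dom_filter_subset arr threshold → Spec_filter_subset arr threshold (filter_subset arr threshold)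

-- ===== LEMMAS AND PROOFS =====

-- the adjacent-pair predicate
def PairGt (s : List Int) (t i : Int) : Prop :=
  PySem.List.pyGetD s i 0 + PySem.List.pyGetD s (i + 1) 0 > t

theorem sorted_getElem_mono (s : List Int) (hs : s.Pairwise (· ≤ ·))
    (a b : Nat) (hab : a < b) (hb : b < s.length) :
    s[a]'(by omega) ≤ s[b] :=
  (List.pairwise_iff_getElem.mp hs) a b (by omega) hb hab

theorem pairGt_mono (s : List Int) (t : Int) (hs : s.Pairwise (· ≤ ·))
    {i j : Int} (h0 : 0 ≤ i) (hij : i ≤ j) (hj : j ≤ (s.length : Int) - 2)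
    (hp : PairGt s t i) : PairGt s t j := by
  rcases eq_or_lt_of_le hij with rfl | hlt
  · exact hp
  have e1 : PySem.List.pyGetD s i 0 = s[i.toNat]'(by omega) :=
    PySem.List.pyGetD_eq_getElem s 0 h0 (by omega)
  have e2 : PySem.List.pyGetD s (i + 1) 0 = s[(i+1).toNat]'(by omega) :=
    PySem.List.pyGetD_eq_getElem s 0 (by omega) (by omega)
  have e3 : PySem.List.pyGetD s j 0 = s[j.toNat]'(by omega) :=
    PySem.List.pyGetD_eq_getElem s 0 (by omega) (by omega)
  have e4 : PySem.List.pyGetD s (j + 1) 0 = s[(j+1).toNat]'(by omega) :=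
    PySem.List.pyGetD_eq_getElem s 0 (by omega) (by omega)
  have l1 : s[i.toNat]'(by omega) ≤ s[j.toNat]'(by omega) :=
    sorted_getElem_mono s hs _ _ (by omega) (by omega)
  have l2 : s[(i+1).toNat]'(by omega) ≤ s[(j+1).toNat]'(by omega) :=
    sorted_getElem_mono s hs _ _ (by omega) (by omega)
  unfold PairGt at hp ⊢
  rw [e1, e2] at hp; rw [e3, e4]; omega

-- A's scan returns [] when no index in the remaining range qualifies
theorem filterALoop_none (s : List Int) (n t : Int) :
    ∀ (fuel : Nat) (i : Int), ((n - 1) - i).toNat = fuel →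
      (∀ j : Int, i ≤ j → j < n - 1 → ¬ PairGt s t j) →
      filterALoop s n t (PySem.List.pyRange i (n - 1) 1) = [] := by
  intro fuel
  induction fuel with
  | zero => intro i hf _; rw [PySem.List.pyRange_one_eq_nil (by omega)]; rfl
  | succ m ih =>
    intro i hf hnone
    rw [PySem.List.pyRange_one_cons (by omega)]
    unfold filterALoop
    rw [if_neg (show ¬(PySem.List.pyGetD s i 0 + PySem.List.pyGetD s (i + 1) 0 > t) from
      hnone i le_rfl (by omega))]
    exact ih (i + 1) (by omega) (fun j hj hj' => hnone j (by omega) hj')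

-- A's scan returns the suffix from the first qualifying index
theorem filterALoop_some (s : List Int) (n t : Int) :
    ∀ (fuel : Nat) (i k : Int), (k - i).toNat = fuel → i ≤ k → k ≤ n - 2 → PairGt s t k →
      (∀ j : Int, i ≤ j → j < k → ¬ PairGt s t j) →
      filterALoop s n t (PySem.List.pyRange i (n - 1) 1) = PySem.List.slice s (some k) none := by
  intro fuel
  induction fuel with
  | zero =>
    intro i k hf hik hk hp _
    have hie : i = k := by omega
    subst hie
    rw [PySem.List.pyRange_one_cons (by omega)]
    unfold filterALoop
    rw [if_pos (show PySem.List.pyGetD s i 0 + PySem.List.pyGetD s (i + 1) 0 > t from hp),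
        if_pos (by omega)]
  | succ m ih =>
    intro i k hf hik hk hp hmin
    rw [PySem.List.pyRange_one_cons (by omega)]
    unfold filterALoop
    rw [if_neg (show ¬(PySem.List.pyGetD s i 0 + PySem.List.pyGetD s (i + 1) 0 > t) from
      hmin i le_rfl (by omega))]
    exact ih (i + 1) k (by omega) (by omega) hk hp (fun j hj hj' => hmin j (by omega) hj')

-- B's binary search returns the suffix from the first qualifying index
theorem bsearchPair_some (s : List Int) (t : Int) (hs : s.Pairwise (· ≤ ·)) (k : Int)
    (hp : PairGt s t k) :
    ∀ (fuel : Nat) (lo hi : Int), (hi - lo).toNat ≤ fuel → 0 ≤ lo → lo ≤ k → k ≤ hi →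
      hi ≤ (s.length : Int) - 2 →
      (∀ j : Int, lo ≤ j → j < k → ¬ PairGt s t j) →
      bsearchPair s t lo hi = PySem.List.slice s (some k) none := by
  intro fuel
  induction fuel with
  | zero =>
    intro lo hi hf h0 hlk hkh hhi _
    have : lo = k := by omega
    subst this
    unfold bsearchPair
    rw [dif_neg (by omega)]
  | succ m ih =>
    intro lo hi hf h0 hlk hkh hhi hmin
    by_cases hlh : lo < hi
    case neg =>
      have : lo = k := by omega
      subst this
      unfold bsearchPair
      rw [dif_neg hlh]
    have hmd : PySem.Int.floordiv (lo + hi) 2 = (lo + hi) / 2 :=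
      PySem.Int.floordiv_eq_ediv_of_pos (by omega)
    unfold bsearchPair
    rw [dif_pos hlh]
    show (if PySem.List.pyGetD s (PySem.Int.floordiv (lo + hi) 2) 0 +
            PySem.List.pyGetD s (PySem.Int.floordiv (lo + hi) 2 + 1) 0 > t then
        bsearchPair s t lo (PySem.Int.floordiv (lo + hi) 2)
      else bsearchPair s t (PySem.Int.floordiv (lo + hi) 2 + 1) hi) =
      PySem.List.slice s (some k) none
    rw [hmd]
    have hb1 : lo ≤ (lo + hi) / 2 := by omega
    have hb2 : (lo + hi) / 2 < hi := by omega
    by_cases hpm : PairGt s t ((lo + hi) / 2)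
    · rw [if_pos (show PySem.List.pyGetD s ((lo + hi) / 2) 0 +
            PySem.List.pyGetD s ((lo + hi) / 2 + 1) 0 > t from hpm)]
      have hkm : k ≤ (lo + hi) / 2 := by
        by_contra hcon
        exact hmin _ hb1 (by omega) hpm
      exact ih lo _ (by omega) h0 hlk hkm (by omega) hmin
    · rw [if_neg (show ¬(PySem.List.pyGetD s ((lo + hi) / 2) 0 +
            PySem.List.pyGetD s ((lo + hi) / 2 + 1) 0 > t) from hpm)]
      have hkm : (lo + hi) / 2 + 1 ≤ k := by
        by_contra hcon
        exact hpm (pairGt_mono s t hs (by omega) (by omega) (by omega) hp)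
      exact ih _ hi (by omega) (by omega) hkm hkh hhi
        (fun j hj hj' => hmin j (by omega) hj')

-- the two ports agree (no Dom/Pre facts are needed)
theorem filter_subset_eq (arr : List Int) (threshold : Int) :
    filter_subset arr threshold = filter_subset_alt arr threshold := by
  classical
  unfold filter_subset filter_subset_alt
  set s := PySem.List.sorted arr (fun x => x) false with hsdef
  have hs : s.Pairwise (· ≤ ·) := PySem.List.sorted_pairwise arr (fun x => x)
  by_cases hn2 : ((s.length : Int)) < 2
  · rw [if_pos hn2, if_pos hn2]
  · rw [if_neg hn2, if_neg hn2]
    have hlast : (s.length : Int) - 2 + 1 = (s.length : Int) - 1 := by omega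
    by_cases hP : PairGt s threshold ((s.length : Int) - 2)
    · -- some pair qualifies: both return the suffix at the least qualifying index
      have hP' := hP
      unfold PairGt at hP'
      rw [hlast] at hP'
      rw [if_neg (show ¬(PySem.List.pyGetD s ((s.length : Int) - 2) 0 +
            PySem.List.pyGetD s ((s.length : Int) - 1) 0 ≤ threshold) by omega)]
      have hQ' : ∃ m : Nat, PairGt s threshold (m : Int) :=
        ⟨((s.length : Int) - 2).toNat, by
          rwa [Int.toNat_of_nonneg (by omega)]⟩
      have hKp : PairGt s threshold ((Nat.find hQ' : Nat) : Int) := Nat.find_spec hQ'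
      have hKle : ((Nat.find hQ' : Nat) : Int) ≤ (s.length : Int) - 2 := by
        have h1 : Nat.find hQ' ≤ ((s.length : Int) - 2).toNat :=
          Nat.find_min' hQ' (by rwa [Int.toNat_of_nonneg (by omega)])
        omega
      have hKmin : ∀ j : Int, 0 ≤ j → j < ((Nat.find hQ' : Nat) : Int) →
          ¬ PairGt s threshold j := by
        intro j hj0 hjK hpj
        have hpj' : PairGt s threshold ((j.toNat : Nat) : Int) := by
          rwa [Int.toNat_of_nonneg hj0]
        exact Nat.find_min hQ' (by omega) hpj'
      rw [filterALoop_some s (s.length : Int) threshold (Nat.find hQ' : Int).toNat 0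
            ((Nat.find hQ' : Nat) : Int) (by omega) (by omega) hKle hKp
            (fun j hj hj' => hKmin j hj hj'),
          bsearchPair_some s threshold hs ((Nat.find hQ' : Nat) : Int) hKp
            ((s.length : Int) - 2).toNat 0 ((s.length : Int) - 2) (by omega) le_rfl
            (by omega) hKle (by omega) (fun j hj hj' => hKmin j hj hj')]
    · -- no pair qualifies: both return []
      have hP' := hP
      unfold PairGt at hP'
      rw [hlast] at hP'
      rw [if_pos (show PySem.List.pyGetD s ((s.length : Int) - 2) 0 +
            PySem.List.pyGetD s ((s.length : Int) - 1) 0 ≤ threshold by omega)]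
      exact filterALoop_none s (s.length : Int) threshold ((s.length : Int) - 1).toNat 0
        (by omega)
        (fun j hj hj' hpj =>
          hP (pairGt_mono s threshold hs hj (by omega) (by omega) hpj))

-- ===== VERDICT (by name: the statement is the Claim_ definition above) =====
theorem filter_subset_spec : Claim_equal_filter_subset := by
  intro arr threshold _
  unfold Spec_filter_subset
  exact filter_subset_eq arr threshold
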